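-- pv_equiv track=rewrite | github.com/openalea-incubator/adel | src/alinea/adel/adelMons/ls_sim.py | extract_dataframe
-- ===== SOURCE A (Python) =====
-- def extract_dataframe(dat, ls_cles, cle, val=None):
--     """extrait dans listes de cles ls_cles les lignes pour lesquelles cle=val; toutes si val=None"""
--     # cree liste d'index ou cle = val
--
--     id = []
--     for i in range(len(dat[cle])):
--         if val == None:
--             id.append(i)
--         else:
--             if dat[cle][i] == val:
--                 id.append(i)
--
--     x = {}
--     for k in ls_cles:  # recupere les paires interessantes
--         v = []
--         for i in id:  # les id respectant cle=val
--             v.append(dat[k][i])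
--
--         x[k] = v
--
--     return x
-- ===== SOURCE B (Python) =====
-- def extract_dataframe(dat, ls_cles, cle, val=None):
--     """extrait dans listes de cles ls_cles les lignes pour lesquelles cle=val; toutes si val=None"""
--     col = dat[cle]
--     return {k: [y for c, y in zip(col, dat[k]) if val == None or c == val]
--             for k in ls_cles}
-- ===== Notes on version B (the rewrite author's own statement) =====
-- stated objective: simpler
-- what changed: B drops A's precomputed index table: for each requested key it zips the filter column with that key's column and keeps matching rows in one comprehension; Pre_ excludes the inputs where A raises (missing cle key, out-of-range selected row) and the corner where a requested key is missing from dat but no row is selected, where A accidentally never evaluates dat[k] and returns an empty column while B naturally raises KeyError.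
-- outside the precondition, e.g. on extract_dataframe({'b': [-1]}, ['a1'], 'b', -3): A returns {'a1': []}, B raises KeyError
import Mathlib
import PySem

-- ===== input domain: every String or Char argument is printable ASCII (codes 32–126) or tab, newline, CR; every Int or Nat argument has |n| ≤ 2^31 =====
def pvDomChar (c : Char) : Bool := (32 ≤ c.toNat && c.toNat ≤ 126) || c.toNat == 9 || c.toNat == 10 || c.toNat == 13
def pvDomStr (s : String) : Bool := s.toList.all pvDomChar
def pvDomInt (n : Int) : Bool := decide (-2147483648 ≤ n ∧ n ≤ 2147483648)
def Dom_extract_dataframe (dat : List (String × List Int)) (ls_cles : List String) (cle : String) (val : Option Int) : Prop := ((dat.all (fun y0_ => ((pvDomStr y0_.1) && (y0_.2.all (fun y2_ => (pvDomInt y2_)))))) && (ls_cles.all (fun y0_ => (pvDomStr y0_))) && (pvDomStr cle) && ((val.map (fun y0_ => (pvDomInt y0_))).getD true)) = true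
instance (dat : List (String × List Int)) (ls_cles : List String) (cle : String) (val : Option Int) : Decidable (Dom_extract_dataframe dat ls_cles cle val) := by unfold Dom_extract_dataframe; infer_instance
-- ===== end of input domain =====

-- B replaces A's precomputed index table by a per-key zip-with-the-filter-column comprehension (objective: simpler).

-- ===== PORT A =====
-- A: build the index list `id` of rows matching cle=val, then gather dat[k][i] for each key.
def extract_dataframe (dat : List (String × List Int)) (ls_cles : List String) (cle : String) (val : Option Int) : List (String × List Int) :=
  let col := ((PySem.Dict.mk dat).get? cle).getD []   -- dat[cle]; Pre_ guarantees the key is present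
  let id := (PySem.List.pyRange 0 (col.length : Int) 1).foldl (fun id i =>
      if val = none then id ++ [i]
      else if PySem.List.pyGet? col i = val then id ++ [i] else id) []
  let x := ls_cles.foldl (fun x k =>
      let v := id.foldl (fun v i =>
          v ++ [PySem.List.pyGetD (((PySem.Dict.mk dat).get? k).getD []) i 0]) []
      x.insert k v) PySem.Dict.empty
  x.items

-- ===== PORT B =====
-- B: for each key, zip the filter column with that key's column and keep matching rows.
def extract_dataframe_alt (dat : List (String × List Int)) (ls_cles : List String) (cle : String) (val : Option Int) : List (String × List Int) :=
  let col := ((PySem.Dict.mk dat).get? cle).getD []   -- dat[cle]; Pre_ guarantees the key is present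
  (ls_cles.foldl (fun x k =>
      x.insert k ((col.zip (((PySem.Dict.mk dat).get? k).getD [])).filterMap
        (fun p => if val = none ∨ some p.1 = val then some p.2 else none))) PySem.Dict.empty).items

-- ===== PRECONDITION & SPEC =====
-- Pre_ excludes the inputs where A raises (cle not a key of dat; a selected row index out of
-- range for a requested column; a requested key missing from dat with some row selected) and the
-- corner where a requested key is missing from dat but NO row is selected: there A accidentally
-- never evaluates dat[k] and returns an empty column, while B naturally raises KeyError.
def Pre_extract_dataframe (dat : List (String × List Int)) (ls_cles : List String) (cle : String) (val : Option Int) : Prop :=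
  ((PySem.Dict.mk dat).get? cle).isSome = true ∧
  ∀ k ∈ ls_cles,
    ((PySem.Dict.mk dat).get? k).isSome = true ∧
    ∀ i, i < (((PySem.Dict.mk dat).get? cle).getD []).length →
      (val = none ∨ (((PySem.Dict.mk dat).get? cle).getD [])[i]? = val) →
      i < (((PySem.Dict.mk dat).get? k).getD []).length
instance (dat : List (String × List Int)) (ls_cles : List String) (cle : String) (val : Option Int) : Decidable (Pre_extract_dataframe dat ls_cles cle val) := by unfold Pre_extract_dataframe; infer_instance
def pvWitness_extract_dataframe : (List (String × List Int)) × List String × String × Option Int :=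
  ([("a", [1, 2, 1]), ("b", [3, 4, 5])], ["b", "a"], "a", some 1)
def Spec_extract_dataframe (dat : List (String × List Int)) (ls_cles : List String) (cle : String) (val : Option Int) (out : List (String × List Int)) : Prop := out = extract_dataframe_alt dat ls_cles cle val
instance (dat : List (String × List Int)) (ls_cles : List String) (cle : String) (val : Option Int) (out : List (String × List Int)) : Decidable (Spec_extract_dataframe dat ls_cles cle val out) := by unfold Spec_extract_dataframe; infer_instance

-- ===== CLAIM (what is proved, stated in full; the proofs are below) =====
def Claim_equal_extract_dataframe : Prop := ∀ (dat : List (String × List Int)) (ls_cles : List String) (cle : String) (val : Option Int), Dom_extract_dataframe dat ls_cles cle val → Pre_extract_dataframe dat ls_cles cle val → Spec_extract_dataframe dat ls_cles cle val (extract_dataframe dat ls_cles cle val)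

-- ===== LEMMAS AND PROOFS =====

-- the element-level keep test both sides use
def pvKeep (val : Option Int) (c : Int) : Bool :=
  match val with
  | none => true
  | some v => decide (c = v)

lemma pvKeep_eq_b (val : Option Int) (p : Int × Int) :
    (if val = none ∨ some p.1 = val then some p.2 else none)
      = (if pvKeep val p.1 then some p.2 else none) := by
  cases val <;> simp [pvKeep]

-- core: gathering kcol at the filtered indices of col = filtering the zip
lemma gather_core (q : Int → Bool) (col : List Int) : ∀ kcol : List Int,
    (∀ i, i < col.length → q (col.getD i 0) → i < kcol.length) →
    ((List.range col.length).filter (fun i => q (col.getD i 0))).map (fun i => kcol.getD i 0)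
      = (col.zip kcol).filterMap (fun p => if q p.1 then some p.2 else none) := by
  induction col with
  | nil => intro kcol _; simp
  | cons c cs ih =>
    intro kcol hb
    rw [List.length_cons, List.range_succ_eq_map]
    by_cases hc : q c = true
    · have h0 : 0 < kcol.length := hb 0 (by simp) (by simpa using hc)
      obtain ⟨y, ys, rfl⟩ : ∃ y ys, kcol = y :: ys := by
        cases kcol with
        | nil => simp at h0
        | cons y ys => exact ⟨y, ys, rfl⟩
      have ihe := ih ys (fun i hi hq => by
        have := hb (i + 1) (by simpa using Nat.succ_lt_succ hi) (by simpa using hq)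
        simpa using this)
      simp only [List.filter_cons, List.getD_cons_zero, hc, if_true, List.filter_map,
        List.map_cons, List.map_map, List.zip_cons_cons, List.filterMap_cons,
        Function.comp_def, List.getD_cons_succ, Nat.succ_eq_add_one]
      simpa using ihe
    · have hc' : q c = false := by simpa using hc
      cases kcol with
      | nil =>
        have hemp : ∀ i ∈ List.range cs.length, ¬ q (cs.getD i 0) = true := by
          intro i hi hq
          have := hb (i + 1) (by simp at hi ⊢; omega) (by simpa using hq)
          simp at this
        simp only [List.zip_nil_right, List.filterMap_nil, List.filter_cons,
          List.getD_cons_zero, hc', Bool.false_eq_true, if_false, List.filter_map,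
          List.map_map, Function.comp_def, List.getD_cons_succ, Nat.succ_eq_add_one,
          List.map_eq_nil_iff, List.filter_eq_nil_iff]
        exact fun a ha hq => hemp a ha hq
      | cons y ys =>
        have ihe := ih ys (fun i hi hq => by
          have := hb (i + 1) (by simpa using Nat.succ_lt_succ hi) (by simpa using hq)
          simpa using this)
        simp only [List.filter_cons, List.getD_cons_zero, hc', Bool.false_eq_true, if_false,
          List.filter_map, List.map_map, List.zip_cons_cons, List.filterMap_cons,
          Function.comp_def, List.getD_cons_succ, Nat.succ_eq_add_one]
        exact ihe

-- A's index loop is a filter of the range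
lemma id_loop_eq (val : Option Int) (col : List Int) (l : List Int) :
    (l.foldl (fun id i =>
        if val = none then id ++ [i]
        else if PySem.List.pyGet? col i = val then id ++ [i] else id) [])
      = l.filter (fun i => decide (val = none ∨ PySem.List.pyGet? col i = val)) := by
  have key : ∀ (l : List Int) (acc : List Int),
      l.foldl (fun id i =>
        if val = none then id ++ [i]
        else if PySem.List.pyGet? col i = val then id ++ [i] else id) acc
      = acc ++ l.filter (fun i => decide (val = none ∨ PySem.List.pyGet? col i = val)) := by
    intro l
    induction l with
    | nil => intro acc; simp
    | cons a as ih =>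
      intro acc
      simp only [List.foldl_cons, List.filter_cons]
      by_cases h0 : val = none
      · rw [if_pos h0, ih]
        simp [h0]
      · rw [if_neg h0]
        by_cases h1 : PySem.List.pyGet? col a = val
        · rw [if_pos h1, ih]
          simp [h0, h1]
        · rw [if_neg h1, ih]
          simp [h0, h1]
  simpa using key l []

-- A's gathered column for one key equals B's zip-filter
lemma column_eq (val : Option Int) (col kcol : List Int)
    (hb : ∀ i, i < col.length → (val = none ∨ col[i]? = val) → i < kcol.length) :
    (((PySem.List.pyRange 0 (col.length : Int) 1).foldl (fun id i =>
        if val = none then id ++ [i]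
        else if PySem.List.pyGet? col i = val then id ++ [i] else id) []).foldl
        (fun v i => v ++ [PySem.List.pyGetD kcol i 0]) [])
      = (col.zip kcol).filterMap (fun p => if val = none ∨ some p.1 = val then some p.2 else none) := by
  rw [id_loop_eq val col, PySem.List.foldl_append_singleton_eq_map, PySem.List.pyRange_one]
  simp only [Int.sub_zero, Int.toNat_natCast, zero_add]
  rw [List.filter_map, List.map_map]
  have hfil : List.filter ((fun i : Int => decide (val = none ∨ PySem.List.pyGet? col i = val))
        ∘ (fun k : Nat => (k : Int))) (List.range col.length)
      = (List.range col.length).filter (fun i => pvKeep val (col.getD i 0)) := by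
    apply List.filter_congr
    intro i hi
    have hi' : i < col.length := List.mem_range.mp hi
    cases val with
    | none => simp [pvKeep]
    | some v =>
      simp [pvKeep, Function.comp, PySem.List.pyGet?_natCast,
        List.getElem?_eq_getElem hi']
  rw [hfil]
  have hmap : ((List.range col.length).filter (fun i => pvKeep val (col.getD i 0))).map
        ((fun i : Int => PySem.List.pyGetD kcol i 0) ∘ (fun k : Nat => (k : Int)))
      = ((List.range col.length).filter (fun i => pvKeep val (col.getD i 0))).map
        (fun i => kcol.getD i 0) := by
    apply List.map_congr_left
    intro i _
    simp [Function.comp, PySem.List.pyGetD_natCast]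
  rw [hmap]
  have hb' : ∀ i, i < col.length → pvKeep val (col.getD i 0) → i < kcol.length := by
    intro i hi hq
    apply hb i hi
    cases val with
    | none => exact Or.inl rfl
    | some v =>
      right
      simp only [pvKeep, decide_eq_true_eq] at hq
      rw [List.getElem?_eq_getElem hi]
      rw [List.getD_eq_getElem _ _ hi] at hq
      simpa using hq
  rw [gather_core (pvKeep val) col kcol hb']
  apply List.filterMap_congr
  intro p _
  exact (pvKeep_eq_b val p).symm

-- ===== VERDICT (by name: the statement is the Claim_ definition above) =====
theorem extract_dataframe_spec : Claim_equal_extract_dataframe := by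
  intro dat ls_cles cle val _hdom hpre
  unfold Spec_extract_dataframe extract_dataframe extract_dataframe_alt
  dsimp only
  obtain ⟨_hcle, hkeys⟩ := hpre
  congr 1
  apply PySem.List.foldl_congr_mem
  intro x k hk
  obtain ⟨_hks, hbound⟩ := hkeys k hk
  rw [column_eq val _ _ hbound]
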